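-- pv_equiv track=rewrite | github.com/kjruan-highnote/lamplight-ai-agent | agents/ship-agent/src/workflow_diagram_generator.py | _identify_participants_with_aliases
-- ===== SOURCE A (Python) =====
-- from typing import Dict, List, Any, Optional, Tuple
--
-- def _identify_participants_with_aliases(workflow_data: Dict[str, Any]) -> List[Tuple[str, str]]:
--     """Identify participants and return as (alias, default_name) tuples"""
--     participants = [
--         ("CUSTOMER", "{{CUSTOMER_NAME}}"),
--         ("VENDOR", "{{VENDOR_NAME}}")
--     ]
--
--     # Check for webhook/external services
--     steps = workflow_data.get('steps', [])
--     has_webhook = False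
--     has_external = False
--     has_auth = False
--     has_payment = False
--
--     for step in steps:
--         op_name = step.get('operation', '').lower()
--         if any(keyword in op_name for keyword in ['webhook', 'event', 'notification']) and not has_webhook:
--             participants.append(("WEBHOOK", "{{WEBHOOK_SERVICE}}"))
--             has_webhook = True
--         if any(keyword in op_name for keyword in ['external', 'third']) and not has_external:
--             participants.append(("EXTERNAL", "{{EXTERNAL_SERVICE}}"))
--             has_external = True
--         if any(keyword in op_name for keyword in ['auth', 'authenticate', 'authorize']) and not has_auth:
--             participants.append(("AUTH", "{{AUTH_SERVICE}}"))
--             has_auth = True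
--         if any(keyword in op_name for keyword in ['payment', 'transaction', 'charge']) and not has_payment:
--             participants.append(("PAYMENT", "{{PAYMENT_PROCESSOR}}"))
--             has_payment = True
--
--     return participants
-- ===== SOURCE B (Python) =====
-- from typing import Dict, List, Any, Tuple
--
-- def _identify_participants_with_aliases(workflow_data: Dict[str, Any]) -> List[Tuple[str, str]]:
--     """Identify participants and return as (alias, default_name) tuples.
--
--     Two-pass: record each category's first matching step index, then arrange
--     the found categories by (first index, priority)."""
--     participants = [
--         ("CUSTOMER", "{{CUSTOMER_NAME}}"),
--         ("VENDOR", "{{VENDOR_NAME}}")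
--     ]
--     categories = [
--         (["webhook", "event", "notification"], ("WEBHOOK", "{{WEBHOOK_SERVICE}}")),
--         (["external", "third"], ("EXTERNAL", "{{EXTERNAL_SERVICE}}")),
--         (["auth", "authenticate", "authorize"], ("AUTH", "{{AUTH_SERVICE}}")),
--         (["payment", "transaction", "charge"], ("PAYMENT", "{{PAYMENT_PROCESSOR}}")),
--     ]
--     ops = [step.get('operation', '').lower() for step in workflow_data.get('steps', [])]
--     found = []
--     for pri, (keywords, pair) in enumerate(categories):
--         idx = next((i for i, op in enumerate(ops) if any(k in op for k in keywords)), None)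
--         if idx is not None:
--             found.append(((idx, pri), pair))
--     found.sort(key=lambda e: e[0])
--     return participants + [pair for _, pair in found]
-- ===== Notes on version B (the rewrite author's own statement) =====
-- stated objective: alternative
-- what changed: Replaces A's single incremental flag-setting loop over steps with a two-pass build: compute each category's first matching step index, then sort the found categories by (first index, priority) and append them after the two base participants.
import Mathlib
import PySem

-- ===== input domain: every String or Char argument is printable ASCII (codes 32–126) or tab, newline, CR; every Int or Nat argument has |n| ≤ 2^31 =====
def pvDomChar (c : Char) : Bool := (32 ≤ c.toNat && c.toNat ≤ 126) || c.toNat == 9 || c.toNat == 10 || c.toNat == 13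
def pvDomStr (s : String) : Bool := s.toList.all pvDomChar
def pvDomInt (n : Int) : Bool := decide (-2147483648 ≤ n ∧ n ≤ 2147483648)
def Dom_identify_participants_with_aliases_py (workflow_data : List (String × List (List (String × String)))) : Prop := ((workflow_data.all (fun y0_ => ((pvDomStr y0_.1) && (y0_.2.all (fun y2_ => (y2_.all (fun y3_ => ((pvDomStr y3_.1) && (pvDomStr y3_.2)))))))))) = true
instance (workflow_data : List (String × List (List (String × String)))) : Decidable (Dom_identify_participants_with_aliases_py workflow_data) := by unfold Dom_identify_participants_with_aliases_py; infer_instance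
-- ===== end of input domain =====

-- B replaces A's incremental flag-setting loop by a two-pass build (first-match index per category, then arrange by (index, priority)); objective: alternative decomposition, same cost.


-- ===== PORT A =====
-- A-side helper: the body of A's `for step in steps` loop; state = (participants, has_webhook, has_external, has_auth, has_payment)
def aStep (st : List (String × String) × Bool × Bool × Bool × Bool)
    (step : List (String × String)) : List (String × String) × Bool × Bool × Bool × Bool :=
  match st with
  | (ps, hw, he, ha, hp) =>
    let op := PySem.Str.lower ((List.lookup "operation" step).getD "")
    let s1 := if (["webhook", "event", "notification"].any (fun k => PySem.Str.isIn k op)) && !hw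
              then (ps ++ [("WEBHOOK", "{{WEBHOOK_SERVICE}}")], true) else (ps, hw)
    let s2 := if (["external", "third"].any (fun k => PySem.Str.isIn k op)) && !he
              then (s1.1 ++ [("EXTERNAL", "{{EXTERNAL_SERVICE}}")], true) else (s1.1, he)
    let s3 := if (["auth", "authenticate", "authorize"].any (fun k => PySem.Str.isIn k op)) && !ha
              then (s2.1 ++ [("AUTH", "{{AUTH_SERVICE}}")], true) else (s2.1, ha)
    let s4 := if (["payment", "transaction", "charge"].any (fun k => PySem.Str.isIn k op)) && !hp
              then (s3.1 ++ [("PAYMENT", "{{PAYMENT_PROCESSOR}}")], true) else (s3.1, hp)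
    (s4.1, s1.2, s2.2, s3.2, s4.2)

def identify_participants_with_aliases_py (workflow_data : List (String × List (List (String × String)))) : List (String × String) :=
  let participants : List (String × String) := [("CUSTOMER", "{{CUSTOMER_NAME}}"), ("VENDOR", "{{VENDOR_NAME}}")]
  let steps := (List.lookup "steps" workflow_data).getD []
  (steps.foldl aStep (participants, false, false, false, false)).1

-- ===== PORT B =====
-- B-side helper: the fixed category table (keywords, participant pair), in priority order
def altCats : List (List String × (String × String)) :=
  [ (["webhook", "event", "notification"], ("WEBHOOK", "{{WEBHOOK_SERVICE}}")),
    (["external", "third"], ("EXTERNAL", "{{EXTERNAL_SERVICE}}")),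
    (["auth", "authenticate", "authorize"], ("AUTH", "{{AUTH_SERVICE}}")),
    (["payment", "transaction", "charge"], ("PAYMENT", "{{PAYMENT_PROCESSOR}}")) ]

def identify_participants_with_aliases_py_alt (workflow_data : List (String × List (List (String × String)))) : List (String × String) :=
  let participants : List (String × String) := [("CUSTOMER", "{{CUSTOMER_NAME}}"), ("VENDOR", "{{VENDOR_NAME}}")]
  let ops := ((List.lookup "steps" workflow_data).getD []).map
      (fun step => PySem.Str.lower ((List.lookup "operation" step).getD ""))
  let found := altCats.zipIdx.filterMap (fun cp =>
      (ops.findIdx? (fun op => cp.1.1.any (fun k => PySem.Str.isIn k op))).map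
        (fun i => ((i, cp.2), cp.1.2)))
  participants ++ (PySem.List.sorted found (fun e => toLex e.1)).map (·.2)

-- ===== PRECONDITION & SPEC =====
def Spec_identify_participants_with_aliases_py (workflow_data : List (String × List (List (String × String)))) (out : List (String × String)) : Prop := out = identify_participants_with_aliases_py_alt workflow_data
instance (workflow_data : List (String × List (List (String × String)))) (out : List (String × String)) : Decidable (Spec_identify_participants_with_aliases_py workflow_data out) := by unfold Spec_identify_participants_with_aliases_py; infer_instance

-- ===== CLAIM (what is proved, stated in full; the proofs are below) =====
def Claim_equal_identify_participants_with_aliases_py : Prop := ∀ (workflow_data : List (String × List (List (String × String)))), Dom_identify_participants_with_aliases_py workflow_data → Spec_identify_participants_with_aliases_py workflow_data (identify_participants_with_aliases_py workflow_data)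

-- ===== LEMMAS AND PROOFS =====

-- the four per-step match predicates (shared subterms of both ports)
def m1 (step : List (String × String)) : Bool := ["webhook", "event", "notification"].any (fun k => PySem.Str.isIn k (PySem.Str.lower ((List.lookup "operation" step).getD "")))
def m2 (step : List (String × String)) : Bool := ["external", "third"].any (fun k => PySem.Str.isIn k (PySem.Str.lower ((List.lookup "operation" step).getD "")))
def m3 (step : List (String × String)) : Bool := ["auth", "authenticate", "authorize"].any (fun k => PySem.Str.isIn k (PySem.Str.lower ((List.lookup "operation" step).getD "")))
def m4 (step : List (String × String)) : Bool := ["payment", "transaction", "charge"].any (fun k => PySem.Str.isIn k (PySem.Str.lower ((List.lookup "operation" step).getD "")))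

def Wp : String × String := ("WEBHOOK", "{{WEBHOOK_SERVICE}}")
def Ep : String × String := ("EXTERNAL", "{{EXTERNAL_SERVICE}}")
def Ap : String × String := ("AUTH", "{{AUTH_SERVICE}}")
def Pp : String × String := ("PAYMENT", "{{PAYMENT_PROCESSOR}}")

def shiftE (e : (Nat × Nat) × (String × String)) : (Nat × Nat) × (String × String) := ((e.1.1 + 1, e.1.2), e.2)

def zBlock (s : List (String × String)) (hw he ha hp : Bool) : List ((Nat × Nat) × (String × String)) :=
  (if m1 s && !hw then [((0, 0), Wp)] else []) ++ (if m2 s && !he then [((0, 1), Ep)] else []) ++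
  (if m3 s && !ha then [((0, 2), Ap)] else []) ++ (if m4 s && !hp then [((0, 3), Pp)] else [])

def arrange : List (List (String × String)) → Bool → Bool → Bool → Bool → List ((Nat × Nat) × (String × String))
  | [], _, _, _, _ => []
  | s :: t, hw, he, ha, hp =>
      zBlock s hw he ha hp ++ (arrange t (hw || m1 s) (he || m2 s) (ha || m3 s) (hp || m4 s)).map shiftE

def catTerm (f : Bool) (o : Option Nat) (pri : Nat) (p : String × String) : List ((Nat × Nat) × (String × String)) :=
  if f then [] else ((o.map (fun i => ((i, pri), p))).toList)

def build (steps : List (List (String × String))) (hw he ha hp : Bool) : List ((Nat × Nat) × (String × String)) :=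
  catTerm hw (steps.findIdx? m1) 0 Wp ++ catTerm he (steps.findIdx? m2) 1 Ep ++
  catTerm ha (steps.findIdx? m3) 2 Ap ++ catTerm hp (steps.findIdx? m4) 3 Pp


theorem filterMap_cons_toList {α β : Type} (f : α → Option β) (a : α) (l : List α) :
    List.filterMap f (a :: l) = (f a).toList ++ List.filterMap f l := by
  cases h : f a <;> simp [h]

theorem catTerm_cons (f m : Bool) (o : Option Nat) (pri : Nat) (p : String × String) :
    catTerm f (if m then some 0 else o.map (· + 1)) pri p
      = (if m && !f then [((0, pri), p)] else []) ++ (catTerm (f || m) o pri p).map shiftE := by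
  cases f <;> cases m <;> cases o <;> simp [catTerm, shiftE]

theorem interleave_perm {α : Type} [DecidableEq α] (a1 a2 a3 a4 b1 b2 b3 b4 : List α) :
    ((a1 ++ a2 ++ a3 ++ a4) ++ (b1 ++ b2 ++ b3 ++ b4)).Perm ((a1 ++ b1) ++ (a2 ++ b2) ++ (a3 ++ b3) ++ (a4 ++ b4)) := by
  rw [List.perm_iff_count]; intro x; simp [List.count_append]; omega

theorem aStep_eq (ps : List (String × String)) (hw he ha hp : Bool) (s : List (String × String)) :
    aStep (ps, hw, he, ha, hp) s
      = (ps ++ (zBlock s hw he ha hp).map (·.2), hw || m1 s, he || m2 s, ha || m3 s, hp || m4 s) := by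
  simp only [aStep]
  rw [show (["webhook", "event", "notification"].any fun k => PySem.Str.isIn k (PySem.Str.lower ((List.lookup "operation" s).getD ""))) = m1 s from rfl]
  rw [show (["external", "third"].any fun k => PySem.Str.isIn k (PySem.Str.lower ((List.lookup "operation" s).getD ""))) = m2 s from rfl]
  rw [show (["auth", "authenticate", "authorize"].any fun k => PySem.Str.isIn k (PySem.Str.lower ((List.lookup "operation" s).getD ""))) = m3 s from rfl]
  rw [show (["payment", "transaction", "charge"].any fun k => PySem.Str.isIn k (PySem.Str.lower ((List.lookup "operation" s).getD ""))) = m4 s from rfl]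
  cases h1 : m1 s <;> cases hw <;> cases h2 : m2 s <;> cases he <;> cases h3 : m3 s <;> cases ha <;>
    cases h4 : m4 s <;> cases hp <;> simp [h1, h2, h3, h4, zBlock, Wp, Ep, Ap, Pp]

theorem arrange_perm_build (steps : List (List (String × String))) (hw he ha hp : Bool) :
    (arrange steps hw he ha hp).Perm (build steps hw he ha hp) := by
  induction steps generalizing hw he ha hp with
  | nil => simp [arrange, build, catTerm]
  | cons s t ih =>
    have hb : build (s :: t) hw he ha hp
        = ((if m1 s && !hw then [((0, 0), Wp)] else []) ++ (catTerm (hw || m1 s) (t.findIdx? m1) 0 Wp).map shiftE)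
          ++ ((if m2 s && !he then [((0, 1), Ep)] else []) ++ (catTerm (he || m2 s) (t.findIdx? m2) 1 Ep).map shiftE)
          ++ ((if m3 s && !ha then [((0, 2), Ap)] else []) ++ (catTerm (ha || m3 s) (t.findIdx? m3) 2 Ap).map shiftE)
          ++ ((if m4 s && !hp then [((0, 3), Pp)] else []) ++ (catTerm (hp || m4 s) (t.findIdx? m4) 3 Pp).map shiftE) := by
      simp only [build, List.findIdx?_cons, catTerm_cons]
    rw [hb, arrange, zBlock]
    have hperm := (ih (hw || m1 s) (he || m2 s) (ha || m3 s) (hp || m4 s)).map shiftE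
    rw [build] at hperm
    simp only [List.map_append] at hperm
    exact (List.Perm.append_left _ hperm).trans (interleave_perm _ _ _ _ _ _ _ _)

theorem foldA_arrange (steps : List (List (String × String))) (ps : List (String × String)) (hw he ha hp : Bool) :
    (steps.foldl aStep (ps, hw, he, ha, hp)).1 = ps ++ (arrange steps hw he ha hp).map (·.2) := by
  induction steps generalizing ps hw he ha hp with
  | nil => simp [arrange]
  | cons s t ih =>
    rw [List.foldl_cons, aStep_eq, ih, arrange]
    simp [Function.comp, shiftE]

theorem zBlock_pairwise (s : List (String × String)) (hw he ha hp : Bool) :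
    List.Pairwise (fun (a b : (Nat × Nat) × (String × String)) => toLex a.1 < toLex b.1) (zBlock s hw he ha hp) := by
  unfold zBlock
  cases m1 s && !hw <;> cases m2 s && !he <;> cases m3 s && !ha <;> cases m4 s && !hp <;>
    simp <;> decide

theorem fst_of_mem_zBlock (a : (Nat × Nat) × (String × String)) (s : List (String × String)) (hw he ha hp : Bool)
    (h : a ∈ zBlock s hw he ha hp) : a.1.1 = 0 := by
  unfold zBlock at h
  split_ifs at h <;> simp_all <;> rcases h with h | h | h | h <;> simp_all

theorem shiftE_lt (a b : (Nat × Nat) × (String × String)) (h : toLex a.1 < toLex b.1) :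
    toLex (shiftE a).1 < toLex (shiftE b).1 := by
  rw [Prod.Lex.toLex_lt_toLex] at h ⊢
  simp only [shiftE]
  rcases h with h | ⟨h1, h2⟩
  · left; omega
  · right; exact ⟨by omega, h2⟩

theorem arrange_pairwise (steps : List (List (String × String))) (hw he ha hp : Bool) :
    List.Pairwise (fun a b => toLex a.1 < toLex b.1) (arrange steps hw he ha hp) := by
  induction steps generalizing hw he ha hp with
  | nil => simp [arrange]
  | cons s t ih =>
    rw [arrange, List.pairwise_append]
    refine ⟨zBlock_pairwise s hw he ha hp, List.Pairwise.map _ (fun a b h => shiftE_lt a b h) (ih _ _ _ _), ?_⟩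
    intro a hma b hmb
    rcases List.mem_map.mp hmb with ⟨e, _, rfl⟩
    rw [Prod.Lex.toLex_lt_toLex]
    left
    rw [fst_of_mem_zBlock a s hw he ha hp hma]
    simp [shiftE]


-- ===== VERDICT (by name: the statement is the Claim_ definition above) =====
theorem identify_participants_with_aliases_py_spec : Claim_equal_identify_participants_with_aliases_py := by
  intro wd _
  unfold Spec_identify_participants_with_aliases_py
  simp only [identify_participants_with_aliases_py, identify_participants_with_aliases_py_alt]
  rw [foldA_arrange]
  have hfound : (List.filterMap
            (fun cp =>
              Option.map (fun i => ((i, cp.2), cp.1.2))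
                (List.findIdx? (fun op => cp.1.1.any fun k => PySem.Str.isIn k op)
                  (List.map (fun step => PySem.Str.lower ((List.lookup "operation" step).getD ""))
                    ((List.lookup "steps" wd).getD []))))
            altCats.zipIdx)
      = build ((List.lookup "steps" wd).getD []) false false false false := by
    rw [show altCats.zipIdx = [((["webhook", "event", "notification"], ("WEBHOOK", "{{WEBHOOK_SERVICE}}")), 0),
      ((["external", "third"], ("EXTERNAL", "{{EXTERNAL_SERVICE}}")), 1),
      ((["auth", "authenticate", "authorize"], ("AUTH", "{{AUTH_SERVICE}}")), 2),
      ((["payment", "transaction", "charge"], ("PAYMENT", "{{PAYMENT_PROCESSOR}}")), 3)] from rfl]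
    rw [filterMap_cons_toList, filterMap_cons_toList, filterMap_cons_toList, filterMap_cons_toList, List.filterMap_nil]
    simp only [List.findIdx?_map]
    have e1 : m1 = fun step => ["webhook", "event", "notification"].any fun k => PySem.Str.isIn k (PySem.Str.lower ((List.lookup "operation" step).getD "")) := rfl
    have e2 : m2 = fun step => ["external", "third"].any fun k => PySem.Str.isIn k (PySem.Str.lower ((List.lookup "operation" step).getD "")) := rfl
    have e3 : m3 = fun step => ["auth", "authenticate", "authorize"].any fun k => PySem.Str.isIn k (PySem.Str.lower ((List.lookup "operation" step).getD "")) := rfl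
    have e4 : m4 = fun step => ["payment", "transaction", "charge"].any fun k => PySem.Str.isIn k (PySem.Str.lower ((List.lookup "operation" step).getD "")) := rfl
    simp [build, catTerm, Wp, Ep, Ap, Pp, e1, e2, e3, e4, Function.comp_def]
  rw [hfound, PySem.List.sorted_eq_of_perm_of_pairwise_lt _ _ _
      (arrange_perm_build ((List.lookup "steps" wd).getD []) false false false false)
      (arrange_pairwise ((List.lookup "steps" wd).getD []) false false false false)]
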